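-- pv_equiv track=rewrite | github.com/limsubinn/Algorithm | Programmers/LV2/pg172927.py | make_queue
-- ===== SOURCE A (Python) =====
-- import heapq
--
-- def make_queue(s, minerals):
--     dic = {"diamond": 25, "iron": 5, "stone": 1}
--
--     queue = []
--     tq = []
--     ts = 0
--
--     for i in range(len(minerals)):
--         if i >= s:  # 더이상 광물을 캘 수 없는 경우
--             break
--
--         tq.append(minerals[i])
--         ts += dic[minerals[i]]
--
--         # 한 묶음
--         if i % 5 == 4:
--             heapq.heappush(queue, (-ts, tq))
--             tq = []
--             ts = 0
--
--     # 남은 광물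
--     if tq:
--         heapq.heappush(queue, (-ts, tq))
--
--     return queue
-- ===== SOURCE B (Python) =====
-- import heapq
--
-- def make_queue(s, minerals):
--     dic = {"diamond": 25, "iron": 5, "stone": 1}
--     queue = []
--     prefix = minerals[:max(s, 0)]
--     for start in range(0, len(prefix), 5):
--         block = prefix[start:start + 5]
--         total = sum(dic[m] for m in block)
--         heapq.heappush(queue, (-total, block))
--     return queue
-- ===== Notes on version B (the rewrite author's own statement) =====
-- stated objective: simpler
-- what changed: B slices the working prefix minerals[:max(s,0)] up front and iterates over it in blocks of 5, computing each block's fatigue total with a generator sum and pushing it, instead of A's per-index loop with a break and running tq/ts accumulators reset at i%5==4.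
import Mathlib
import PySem

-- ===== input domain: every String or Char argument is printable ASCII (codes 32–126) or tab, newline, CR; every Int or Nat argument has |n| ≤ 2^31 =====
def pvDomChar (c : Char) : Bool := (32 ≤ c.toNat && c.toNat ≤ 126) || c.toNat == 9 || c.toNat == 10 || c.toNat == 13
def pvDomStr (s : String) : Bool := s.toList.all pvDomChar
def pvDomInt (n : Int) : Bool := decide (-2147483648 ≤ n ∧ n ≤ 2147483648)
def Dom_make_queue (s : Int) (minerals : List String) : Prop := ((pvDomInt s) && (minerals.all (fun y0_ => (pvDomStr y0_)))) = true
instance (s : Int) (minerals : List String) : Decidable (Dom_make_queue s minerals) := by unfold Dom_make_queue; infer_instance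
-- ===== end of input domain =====

-- B iterates over the prefix minerals[:max(s,0)] in blocks of 5 and pushes each block's
-- fatigue total directly, instead of A's per-index loop with break and running accumulators
-- (objective: simpler decomposition; same asymptotic cost).

-- shared helpers: both Pythons use the same dict literal and call heapq.heappush
def pvDic : PySem.Dict String Int := PySem.Dict.ofList [("diamond", 25), ("iron", 5), ("stone", 1)]

-- dic[m]; Python raises KeyError on a missing key (excluded by Pre_), the port returns 0 there
def pvDicVal (m : String) : Int := (pvDic.get? m).getD 0

-- Python list/tuple comparison used by heapq: (-ts, tq) tuples, lexicographic
def pvListLt : List String → List String → Bool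
  | [], [] => false
  | [], _ :: _ => true
  | _ :: _, [] => false
  | a :: as, b :: bs => if a < b then true else if b < a then false else pvListLt as bs

def pvPairLt (x y : Int × List String) : Bool :=
  x.1 < y.1 || (x.1 == y.1 && pvListLt x.2 y.2)

-- heapq._siftdown(heap, 0, pos) with heap[pos] = item (the while-loop, step for step)
def pvSiftdown (heap : List (Int × List String)) (pos : Nat) (item : Int × List String) :
    List (Int × List String) :=
  if h : pos = 0 then heap.set 0 item
  else
    let parentpos := (pos - 1) / 2
    let parent := heap.getD parentpos (0, [])
    if pvPairLt item parent then pvSiftdown (heap.set pos parent) parentpos item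
    else heap.set pos item
termination_by pos
decreasing_by omega

-- heapq.heappush: append, then sift the new last element down towards the root
def pvHeappush (heap : List (Int × List String)) (item : Int × List String) :
    List (Int × List String) :=
  pvSiftdown (heap ++ [item]) heap.length item

-- ===== PORT A =====
-- A's for-loop over range(len(minerals)) with the 'if i >= s: break', carrying queue/tq/ts
def pvALoop (s : Int) : List String → Nat → List (Int × List String) → List String → Int →
    List (Int × List String) × List String × Int
  | [], _, q, tq, ts => (q, tq, ts)
  | m :: rest, i, q, tq, ts =>
    if (i : Int) ≥ s then (q, tq, ts)
    else
      let tq' := tq ++ [m]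
      let ts' := ts + pvDicVal m
      if i % 5 = 4 then pvALoop s rest (i + 1) (pvHeappush q (-ts', tq')) [] 0
      else pvALoop s rest (i + 1) q tq' ts'

def make_queue (s : Int) (minerals : List String) : List (Int × List String) :=
  let r := pvALoop s minerals 0 [] [] 0
  if r.2.1 ≠ [] then pvHeappush r.1 (-r.2.2, r.2.1) else r.1

-- ===== PORT B =====
-- B's for-loop over range(0, len(prefix), 5): one block of ≤5 per step
def pvBBlocks : List String → List (Int × List String) → List (Int × List String)
  | [], q => q
  | x :: rest, q =>
    let block := (x :: rest).take 5
    let total := block.foldl (fun acc m => acc + pvDicVal m) 0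
    pvBBlocks ((x :: rest).drop 5) (pvHeappush q (-total, block))
termination_by xs _ => xs.length
decreasing_by simp

def make_queue_alt (s : Int) (minerals : List String) : List (Int × List String) :=
  let pre := minerals.take (max s 0).toNat
  pvBBlocks pre []

-- ===== PRECONDITION & SPEC =====
-- Pre_ excludes exactly the inputs where Python A raises KeyError: a mineral other than
-- diamond/iron/stone among the first max(s,0) elements (the only ones the loop reads).
def Pre_make_queue (s : Int) (minerals : List String) : Prop :=
  ∀ m ∈ minerals.take s.toNat, m = "diamond" ∨ m = "iron" ∨ m = "stone"
instance (s : Int) (minerals : List String) : Decidable (Pre_make_queue s minerals) := by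
  unfold Pre_make_queue; infer_instance
def pvWitness_make_queue : Int × List String := (7, ["stone", "iron", "diamond", "stone", "stone", "iron"])

def Spec_make_queue (s : Int) (minerals : List String) (out : List (Int × List String)) : Prop := out = make_queue_alt s minerals
instance (s : Int) (minerals : List String) (out : List (Int × List String)) : Decidable (Spec_make_queue s minerals out) := by unfold Spec_make_queue; infer_instance

-- ===== CLAIM (what is proved, stated in full; the proofs are below) =====
def Claim_equal_make_queue : Prop := ∀ (s : Int) (minerals : List String), Dom_make_queue s minerals → Pre_make_queue s minerals → Spec_make_queue s minerals (make_queue s minerals)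

-- ===== LEMMAS AND PROOFS =====

-- the break-free version of A's loop, over an already-truncated list
def pvALoopP : List String → Nat → List (Int × List String) → List String → Int →
    List (Int × List String) × List String × Int
  | [], _, q, tq, ts => (q, tq, ts)
  | m :: rest, i, q, tq, ts =>
    let tq' := tq ++ [m]
    let ts' := ts + pvDicVal m
    if i % 5 = 4 then pvALoopP rest (i + 1) (pvHeappush q (-ts', tq')) [] 0
    else pvALoopP rest (i + 1) q tq' ts'

lemma pvALoop_eq_trunc (s : Int) :
    ∀ (xs : List String) (i : Nat) (q : List (Int × List String)) (tq : List String) (ts : Int),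
      pvALoop s xs i q tq ts = pvALoopP (xs.take (s - i).toNat) i q tq ts := by
  intro xs
  induction xs with
  | nil => intro i q tq ts; simp [pvALoop, pvALoopP]
  | cons m rest ih =>
    intro i q tq ts
    by_cases h : (i : Int) ≥ s
    · have : (s - i).toNat = 0 := by omega
      simp [pvALoop, pvALoopP, h, this]
    · have h1 : (s - i).toNat = (s - (i + 1)).toNat + 1 := by omega
      rw [h1]
      simp only [pvALoop, pvALoopP, List.take_succ_cons, if_neg h]
      by_cases h5 : i % 5 = 4 <;> simp [h5, ih]

def pvFinish (r : List (Int × List String) × List String × Int) : List (Int × List String) :=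
  if r.2.1 ≠ [] then pvHeappush r.1 (-r.2.2, r.2.1) else r.1

lemma pvBlocks_eq :
    ∀ (n : Nat) (xs : List String) (i : Nat) (q : List (Int × List String)),
      xs.length ≤ n → i % 5 = 0 →
      pvFinish (pvALoopP xs i q [] 0) = pvBBlocks xs q := by
  intro n
  induction n with
  | zero =>
    intro xs i q hlen _
    have : xs = [] := by cases xs <;> simp_all
    subst this
    simp [pvALoopP, pvBBlocks, pvFinish]
  | succ n ih =>
    intro xs i q hlen hi
    have h0 : i % 5 ≠ 4 := by omega
    have h1 : (i + 1) % 5 ≠ 4 := by omega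
    have h2 : (i + 2) % 5 ≠ 4 := by omega
    have h3 : (i + 3) % 5 ≠ 4 := by omega
    have h4 : (i + 4) % 5 = 4 := by omega
    have h5 : (i + 5) % 5 = 0 := by omega
    match xs with
    | [] => simp [pvALoopP, pvBBlocks, pvFinish]
    | [a] =>
      simp [pvALoopP, pvBBlocks, pvFinish, h0]
    | [a, b] =>
      simp [pvALoopP, pvBBlocks, pvFinish, h0, h1]
    | [a, b, c] =>
      simp [pvALoopP, pvBBlocks, pvFinish, h0, h1, h2]
    | [a, b, c, d] =>
      simp [pvALoopP, pvBBlocks, pvFinish, h0, h1, h2, h3]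
    | a :: b :: c :: d :: e :: rest =>
      have hrest : rest.length ≤ n := by simp at hlen; omega
      simp only [pvALoopP, pvBBlocks, h0, h1, h2, h3, h4, if_neg, if_pos, if_true, if_false,
        List.take_succ_cons, List.drop_succ_cons, List.nil_append, List.cons_append,
        List.append_nil, List.take_zero, List.drop_zero, List.foldl]
      rw [show i + 1 + 1 + 1 + 1 + 1 = i + 5 by omega]
      rw [ih rest (i + 5) _ hrest h5]

-- ===== VERDICT (by name: the statement is the Claim_ definition above) =====
theorem make_queue_spec : Claim_equal_make_queue := by
  intro s minerals _ _
  show pvFinish (pvALoop s minerals 0 [] [] 0) = pvBBlocks (minerals.take (max s 0).toNat) []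
  rw [pvALoop_eq_trunc]
  have he : (s - ((0 : Nat) : Int)).toNat = (max s 0).toNat := by omega
  rw [he]
  exact pvBlocks_eq (minerals.take (max s 0).toNat).length _ 0 [] (le_refl _) rfl
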